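-- pv_equiv track=rewrite | github.com/Yzdraall/TekTonik_Generator | Solver_etape_par_etapes.py | is_neigh
-- ===== SOURCE A (Python) =====
-- def is_neigh(pos1,pos2):
--     if pos1==pos2:
--         return False
--     for i in range(pos1[0]-1,pos1[0]+2):
--         for j in range(pos1[1]-1,pos1[1]+2):
--             if (i,j)==pos2:
--                 return True
--     return False
-- ===== SOURCE B (Python) =====
-- def is_neigh(pos1, pos2):
--     if pos1 == pos2:
--         return False
--     return abs(pos1[0] - pos2[0]) <= 1 and abs(pos1[1] - pos2[1]) <= 1
-- ===== Notes on version B (the rewrite author's own statement) =====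
-- stated objective: simpler
-- what changed: Replaced the 3x3 nested range scan with a closed-form check |dx|<=1 and |dy|<=1 after the equality guard.
import Mathlib
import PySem

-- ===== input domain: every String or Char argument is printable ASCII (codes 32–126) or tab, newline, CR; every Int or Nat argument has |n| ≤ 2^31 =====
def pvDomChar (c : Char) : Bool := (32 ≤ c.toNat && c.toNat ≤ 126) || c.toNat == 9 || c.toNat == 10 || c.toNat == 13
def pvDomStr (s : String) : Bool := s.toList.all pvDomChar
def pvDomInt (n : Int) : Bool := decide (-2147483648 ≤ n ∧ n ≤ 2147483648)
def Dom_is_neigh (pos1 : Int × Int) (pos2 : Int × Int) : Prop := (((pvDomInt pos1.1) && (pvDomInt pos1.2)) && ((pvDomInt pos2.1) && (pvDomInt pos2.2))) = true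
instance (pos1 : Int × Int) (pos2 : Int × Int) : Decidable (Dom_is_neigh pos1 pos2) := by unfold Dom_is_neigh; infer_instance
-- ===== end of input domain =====

-- B replaces A's 3x3 nested range scan with a closed-form |dx|<=1 and |dy|<=1 check (simpler).


-- ===== PORT A =====
def is_neigh (pos1 : Int × Int) (pos2 : Int × Int) : Bool :=
  if pos1 == pos2 then false
  else
    (PySem.List.pyRange (pos1.1 - 1) (pos1.1 + 2) 1).any (fun i =>
      (PySem.List.pyRange (pos1.2 - 1) (pos1.2 + 2) 1).any (fun j =>
        (i, j) == pos2))

-- ===== PORT B =====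
def is_neigh_alt (pos1 : Int × Int) (pos2 : Int × Int) : Bool :=
  if pos1 == pos2 then false
  else (|pos1.1 - pos2.1| ≤ 1 && |pos1.2 - pos2.2| ≤ 1)

-- ===== PRECONDITION & SPEC =====
def Spec_is_neigh (pos1 : Int × Int) (pos2 : Int × Int) (out : Bool) : Prop := out = is_neigh_alt pos1 pos2
instance (pos1 : Int × Int) (pos2 : Int × Int) (out : Bool) : Decidable (Spec_is_neigh pos1 pos2 out) := by unfold Spec_is_neigh; infer_instance

-- ===== CLAIM (what is proved, stated in full; the proofs are below) =====
def Claim_equal_is_neigh : Prop := ∀ (pos1 : Int × Int) (pos2 : Int × Int), Dom_is_neigh pos1 pos2 → Spec_is_neigh pos1 pos2 (is_neigh pos1 pos2)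

-- ===== LEMMAS AND PROOFS =====

-- ===== VERDICT (by name: the statement is the Claim_ definition above) =====
theorem is_neigh_spec : Claim_equal_is_neigh := by
  intro pos1 pos2 _
  unfold Spec_is_neigh is_neigh is_neigh_alt
  split
  · rfl
  · rcases pos1 with ⟨a, b⟩; rcases pos2 with ⟨c, d⟩
    rw [Bool.eq_iff_iff]
    simp only [List.any_eq_true, PySem.List.mem_pyRange_one, beq_iff_eq, Prod.mk.injEq,
      Bool.and_eq_true, decide_eq_true_eq, abs_le]
    constructor
    · rintro ⟨i, ⟨hi1, hi2⟩, j, ⟨hj1, hj2⟩, rfl, rfl⟩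
      omega
    · rintro ⟨h1, h2⟩
      exact ⟨c, ⟨by omega, by omega⟩, d, ⟨by omega, by omega⟩, rfl, rfl⟩
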